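-- pv_equiv track=rewrite | github.com/jigieobo/murmuration-assessment | code/ri_officials_mvp.py | _extract_muni_from_precinct_label
-- ===== SOURCE A (Python) =====
-- _PRECINCT_SUFFIX_TOKENS = {"limited", "presidential"}
--
-- def _extract_muni_from_precinct_label(label: str | None) -> str | None:
--     """Strip trailing precinct tokens from a "<Muni> <precinct>" label.
--
--     Iterative: handles single tokens ("Barrington 0101" -> "Barrington")
--     and multi tokens ("Providence Limited 2" -> "Providence"). Returns
--     None for non-municipal rows (e.g. "Federal Precinct #1").
--     """
--     if not label:
--         return None
--     if str(label).startswith("Federal Precinct"):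
--         return None
--     out = str(label)
--     while True:
--         parts = out.rsplit(" ", 1)
--         if len(parts) != 2:
--             break
--         if parts[1].isdigit() or parts[1].lower() in _PRECINCT_SUFFIX_TOKENS:
--             out = parts[0]
--         else:
--             break
--     return out.strip() or None
-- ===== SOURCE B (Python) =====
-- _PRECINCT_SUFFIX_TOKENS = {"limited", "presidential"}
--
-- def _extract_muni_from_precinct_label(label):
--     if not label:
--         return None
--     if str(label).startswith("Federal Precinct"):
--         return None
--     parts = str(label).split(" ")  # keep empty fields; space is the only separator
--     # one forward pass: the cut point is just past the LAST non-precinct token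
--     # (the first token is always kept), so no backward stripping loop is needed
--     keep = 1
--     for i, t in enumerate(parts):
--         if i > 0 and not (t.isdigit() or t.lower() in _PRECINCT_SUFFIX_TOKENS):
--             keep = i + 1
--     return " ".join(parts[:keep]).strip() or None
-- ===== Notes on version B (the rewrite author's own statement) =====
-- stated objective: alternative
-- what changed: A strips tokens BACKWARD, repeatedly rsplitting the shrinking string at its last space; B makes one single-space split and ONE FORWARD pass computing the cut index (just past the last non-precinct token, first token always kept), then joins the prefix once.
import Mathlib
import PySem

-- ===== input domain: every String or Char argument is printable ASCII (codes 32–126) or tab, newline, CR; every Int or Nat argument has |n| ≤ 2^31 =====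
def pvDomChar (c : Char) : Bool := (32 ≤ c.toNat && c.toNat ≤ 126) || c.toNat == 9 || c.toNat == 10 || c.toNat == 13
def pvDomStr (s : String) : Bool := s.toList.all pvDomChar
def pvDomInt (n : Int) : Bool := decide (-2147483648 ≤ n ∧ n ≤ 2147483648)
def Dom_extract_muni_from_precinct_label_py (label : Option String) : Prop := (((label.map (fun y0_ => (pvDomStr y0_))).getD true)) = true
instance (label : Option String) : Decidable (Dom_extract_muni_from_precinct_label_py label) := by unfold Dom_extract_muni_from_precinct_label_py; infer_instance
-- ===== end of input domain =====

-- B replaces A's backward while-loop of repeated rsplit(" ", 1) by one split(" ") and a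
-- single FORWARD pass that computes the cut index (just past the last non-precinct token),
-- then joins the prefix once (objective: alternative decomposition, same cost).

-- ===== PORT A =====
-- module constant _PRECINCT_SUFFIX_TOKENS and the shared test
-- "t.isdigit() or t.lower() in _PRECINCT_SUFFIX_TOKENS" (identical in both Pythons)
def pvPrecinctSuffixTokens : List (List Char) := ["limited".toList, "presidential".toList]

def pvIsPrecTok (t : List Char) : Bool :=
  PySem.Chars.strIsdigit t || pvPrecinctSuffixTokens.contains (PySem.Chars.lower t)

-- hand port of out.rsplit(" ", 1) (PySem has no rsplit): some (before, after) at the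
-- LAST space, none when there is no space — exact for the 1-char separator " "
def pvRsplitSp : List Char → Option (List Char × List Char)
  | [] => none
  | c :: rest =>
    match pvRsplitSp rest with
    | some (pre, suf) => some (c :: pre, suf)
    | none => if c = ' ' then some ([], rest) else none

-- termination measure for A's while-loop (cited by pvALoop's decreasing_by)
lemma pvRsplitSp_length : ∀ (cs pre suf : List Char), pvRsplitSp cs = some (pre, suf) → pre.length < cs.length := by
  intro cs
  induction cs with
  | nil => intro pre suf h; simp [pvRsplitSp] at h
  | cons c rest ih =>
    intro pre suf h
    simp only [pvRsplitSp] at h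
    rcases hr : pvRsplitSp rest with _ | ⟨p, q⟩ <;> rw [hr] at h
    · by_cases hc : c = ' ' <;> simp [hc] at h
      · obtain ⟨h1, _⟩ := h; subst h1; simp
    · simp at h
      obtain ⟨h1, _⟩ := h; subst h1
      have := ih p q hr
      simp; omega

-- A's "while True: parts = out.rsplit(' ', 1); …" loop
def pvALoop (out : List Char) : List Char :=
  match h : pvRsplitSp out with
  | none => out
  | some (pre, suf) => if pvIsPrecTok suf then pvALoop pre else out
termination_by out.length
decreasing_by exact pvRsplitSp_length out pre suf h

def extract_muni_from_precinct_label_py (label : Option String) : Option String :=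
  match label with
  | none => none
  | some s =>
    if s = "" then none
    else if PySem.Str.startswith s "Federal Precinct" then none
    else
      let res := PySem.Chars.strip (pvALoop s.toList)
      if res = [] then none else some (String.ofList res)

-- ===== PORT B =====
-- B's for-loop body: "if i > 0 and not (t.isdigit() or t.lower() in _PRECINCT_SUFFIX_TOKENS): keep = i + 1"
def pvKeepStep (k : Int) (it : Int × List Char) : Int :=
  if 0 < it.1 ∧ pvIsPrecTok it.2 = false then it.1 + 1 else k

-- "keep = 1; for i, t in enumerate(parts): …" as a fold over enumerate(parts)
def pvKeepIdx (parts : List (List Char)) : Int :=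
  (PySem.List.enumerate parts).foldl pvKeepStep 1

def extract_muni_from_precinct_label_py_alt (label : Option String) : Option String :=
  match label with
  | none => none
  | some s =>
    if s = "" then none
    else if PySem.Str.startswith s "Federal Precinct" then none
    else
      let parts := PySem.Chars.splitOn s.toList [' ']
      let keep := pvKeepIdx parts
      let res := PySem.Chars.strip (PySem.Chars.join [' '] (PySem.List.slice parts none (some keep)))
      if res = [] then none else some (String.ofList res)

-- ===== PRECONDITION & SPEC =====
def Spec_extract_muni_from_precinct_label_py (label : Option String) (out : Option String) : Prop := out = extract_muni_from_precinct_label_py_alt label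
instance (label : Option String) (out : Option String) : Decidable (Spec_extract_muni_from_precinct_label_py label out) := by unfold Spec_extract_muni_from_precinct_label_py; infer_instance

-- ===== CLAIM (what is proved, stated in full; the proofs are below) =====
def Claim_equal_extract_muni_from_precinct_label_py : Prop := ∀ (label : Option String), Dom_extract_muni_from_precinct_label_py label → Spec_extract_muni_from_precinct_label_py label (extract_muni_from_precinct_label_py label)

-- ===== LEMMAS AND PROOFS =====

-- reference splitter: s.split(" ") as plain structural recursion
def pvSplitSp : List Char → List (List Char)
  | [] => [[]]
  | c :: rest =>
    if c = ' ' then [] :: pvSplitSp rest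
    else
      match pvSplitSp rest with
      | p :: ps => (c :: p) :: ps
      | [] => [[c]]

-- proof-only model of "pop the last qualifying token" (on the REVERSED token list)
def pvPopLoop : List (List Char) → List (List Char)
  | [] => []
  | [p] => [p]
  | p :: q :: rest => if pvIsPrecTok p then pvPopLoop (q :: rest) else p :: q :: rest

lemma pvSplitSp_ne_nil (cs : List Char) : pvSplitSp cs ≠ [] := by
  induction cs with
  | nil => simp [pvSplitSp]
  | cons c rest ih =>
    simp only [pvSplitSp]
    split
    · simp
    · rcases h : pvSplitSp rest with _ | ⟨p, ps⟩ <;> simp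

lemma pvSplitOn_go_eq : ∀ (fuel : Nat) (l cur : List Char) (acc : List (List Char)), l.length < fuel →
    PySem.Chars.splitOn.go [' '] fuel l cur acc =
      acc.reverse ++ (match pvSplitSp l with
        | p :: ps => (cur.reverse ++ p) :: ps
        | [] => []) := by
  intro fuel
  induction fuel with
  | zero => intro l cur acc h; omega
  | succ f ih =>
    intro l cur acc h
    cases l with
    | nil => simp [PySem.Chars.splitOn.go, pvSplitSp]
    | cons c rest =>
      by_cases hc : c = ' '
      · subst hc
        rw [PySem.Chars.splitOn.go]
        rw [if_pos (by simp [List.isPrefixOf])]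
        simp only [List.length_singleton, List.drop_succ_cons, List.drop_zero]
        rw [ih rest [] (cur.reverse :: acc) (by simp at h; omega)]
        rcases hs : pvSplitSp rest with _ | ⟨p, ps⟩
        · exact absurd hs (pvSplitSp_ne_nil rest)
        · simp [pvSplitSp, hs]
      · rw [PySem.Chars.splitOn.go]
        rw [if_neg (by simp [List.isPrefixOf]; exact fun h' => hc h'.symm)]
        rw [ih rest (c :: cur) acc (by simp at h ⊢; omega)]
        rcases hs : pvSplitSp rest with _ | ⟨p, ps⟩
        · exact absurd hs (pvSplitSp_ne_nil rest)
        · simp [pvSplitSp, hc, hs]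

lemma pvSplitOn_eq (cs : List Char) : PySem.Chars.splitOn cs [' '] = pvSplitSp cs := by
  rw [PySem.Chars.splitOn, pvSplitOn_go_eq (cs.length + 1) cs [] [] (by omega)]
  rcases hs : pvSplitSp cs with _ | ⟨p, ps⟩
  · exact absurd hs (pvSplitSp_ne_nil cs)
  · simp

lemma pvSplitSp_no_space (cs : List Char) : ∀ p ∈ pvSplitSp cs, ' ' ∉ p := by
  induction cs with
  | nil => simp [pvSplitSp]
  | cons c rest ih =>
    simp only [pvSplitSp]
    by_cases hc : c = ' '
    · simp [hc]; exact ih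
    · rw [if_neg hc]
      rcases hs : pvSplitSp rest with _ | ⟨p, ps⟩
      · exact absurd hs (pvSplitSp_ne_nil rest)
      · intro q hq
        rcases List.mem_cons.mp hq with h | h
        · subst h
          intro hmem
          rcases List.mem_cons.mp hmem with h | h
          · exact hc h.symm
          · exact ih p (hs ▸ List.mem_cons_self ..) h
        · exact ih q (hs ▸ List.mem_cons_of_mem _ h)

lemma pvJoin_pvSplitSp (cs : List Char) : PySem.Chars.join [' '] (pvSplitSp cs) = cs := by
  induction cs with
  | nil => simp [pvSplitSp, PySem.Chars.join, List.intercalate]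
  | cons c rest ih =>
    simp only [pvSplitSp]
    by_cases hc : c = ' '
    · subst hc
      rw [if_pos rfl]
      rcases hs : pvSplitSp rest with _ | ⟨p, ps⟩
      · exact absurd hs (pvSplitSp_ne_nil rest)
      · rw [hs] at ih
        simpa [PySem.Chars.join, List.intercalate] using ih
    · rw [if_neg hc]
      rcases hs : pvSplitSp rest with _ | ⟨p, ps⟩
      · exact absurd hs (pvSplitSp_ne_nil rest)
      · rw [hs] at ih
        cases ps with
        | nil => simpa [PySem.Chars.join, List.intercalate] using ih
        | cons q qs => simpa [PySem.Chars.join, List.intercalate] using ih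

lemma pvRsplitSp_eq_none (cs : List Char) (h : ' ' ∉ cs) : pvRsplitSp cs = none := by
  induction cs with
  | nil => simp [pvRsplitSp]
  | cons c rest ih =>
    have h1 : ' ' ∉ rest := fun hm => h (List.mem_cons_of_mem _ hm)
    have h2 : ¬ c = ' ' := fun hc => h (by rw [hc]; exact List.mem_cons_self ..)
    simp [pvRsplitSp, ih h1, h2]

lemma pvRsplitSp_append (pre suf : List Char) (h : ' ' ∉ suf) :
    pvRsplitSp (pre ++ ' ' :: suf) = some (pre, suf) := by
  induction pre with
  | nil =>
    simp only [List.nil_append, pvRsplitSp]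
    rw [pvRsplitSp_eq_none suf h]
    simp
  | cons c cs ih =>
    simp only [List.cons_append, pvRsplitSp]
    rw [ih]

lemma pvJoin_append_singleton (ps : List (List Char)) (q : List Char) (h : ps ≠ []) :
    PySem.Chars.join [' '] (ps ++ [q]) = PySem.Chars.join [' '] ps ++ ' ' :: q := by
  induction ps with
  | nil => exact absurd rfl h
  | cons p rest ih =>
    cases rest with
    | nil => simp [PySem.Chars.join, List.intercalate]
    | cons r rs =>
      have := ih (by simp)
      simp only [PySem.Chars.join, List.intercalate] at this ⊢
      simp_all [List.intercalate]

-- A's loop on the joined string is the pop-loop on the reversed token list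
lemma pvKey : ∀ (rp : List (List Char)), rp ≠ [] → (∀ p ∈ rp, ' ' ∉ p) →
    pvALoop (PySem.Chars.join [' '] rp.reverse) = PySem.Chars.join [' '] ((pvPopLoop rp).reverse) := by
  intro rp
  induction rp with
  | nil => intro h; exact absurd rfl h
  | cons p rest ih =>
    intro _ hns
    have hp : ' ' ∉ p := hns p (List.mem_cons_self ..)
    cases rest with
    | nil =>
      have hj : PySem.Chars.join [' '] (([p] : List (List Char)).reverse) = p := by
        simp [PySem.Chars.join, List.intercalate]
      rw [hj, pvALoop]
      split
      · simp [pvPopLoop, PySem.Chars.join, List.intercalate]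
      · rename_i pre suf heq
        rw [pvRsplitSp_eq_none p hp] at heq
        exact absurd heq (by simp)
    | cons q rs =>
      have hjoin : PySem.Chars.join [' '] ((p :: q :: rs).reverse)
          = PySem.Chars.join [' '] ((q :: rs).reverse) ++ ' ' :: p := by
        rw [show (p :: q :: rs).reverse = (q :: rs).reverse ++ [p] from List.reverse_cons ..]
        exact pvJoin_append_singleton _ _ (by simp)
      rw [hjoin, pvALoop]
      split
      · rename_i heq
        rw [pvRsplitSp_append _ _ hp] at heq
        exact absurd heq (by simp)
      · rename_i pre suf heq
        rw [pvRsplitSp_append _ _ hp] at heq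
        simp only [Option.some.injEq, Prod.mk.injEq] at heq
        obtain ⟨h1, h2⟩ := heq
        subst h1; subst h2
        by_cases ht : pvIsPrecTok p
        · rw [if_pos ht, ih (by simp) (fun x hx => hns x (List.mem_cons_of_mem _ hx)),
              show pvPopLoop (p :: q :: rs) = pvPopLoop (q :: rs) from by simp [pvPopLoop, ht]]
        · rw [if_neg ht,
              show pvPopLoop (p :: q :: rs) = p :: q :: rs from by simp [pvPopLoop, ht], hjoin]

-- unrolling B's fold at the last token
lemma pvKeepIdx_append (ys : List (List Char)) (x : List Char) :
    pvKeepIdx (ys ++ [x]) =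
      if 0 < ys.length ∧ pvIsPrecTok x = false then (ys.length : Int) + 1 else pvKeepIdx ys := by
  unfold pvKeepIdx
  rw [PySem.List.enumerate_append, List.foldl_append]
  simp only [PySem.List.enumerate_cons, PySem.List.enumerate_nil, List.foldl_cons, List.foldl_nil]
  unfold pvKeepStep
  by_cases h1 : 0 < ys.length <;> by_cases h2 : pvIsPrecTok x = false <;>
    simp [h1, h2] <;> omega

lemma pvKeepIdx_bounds (parts : List (List Char)) :
    1 ≤ pvKeepIdx parts ∧ pvKeepIdx parts ≤ max 1 (parts.length : Int) := by
  induction parts using List.reverseRecOn with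
  | nil => simp [pvKeepIdx, PySem.List.enumerate_nil]
  | append_singleton ys x ih =>
    rw [pvKeepIdx_append]
    split
    · rename_i h
      constructor <;> simp <;> omega
    · obtain ⟨h1, h2⟩ := ih
      refine ⟨h1, le_trans h2 ?_⟩
      simp only [List.length_append, List.length_singleton]
      omega

-- the pop-loop keeps exactly the first pvKeepIdx tokens
lemma pvPop_take (parts : List (List Char)) (h : parts ≠ []) :
    (pvPopLoop parts.reverse).reverse = parts.take (pvKeepIdx parts).toNat := by
  induction parts using List.reverseRecOn with
  | nil => exact absurd rfl h
  | append_singleton ys x ih =>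
    cases ys with
    | nil =>
      simp [pvPopLoop, pvKeepIdx, pvKeepStep, PySem.List.enumerate_cons, PySem.List.enumerate_nil]
    | cons y ys' =>
      have hys : (y :: ys') ≠ [] := by simp
      have hrev : ((y :: ys') ++ [x]).reverse = x :: (y :: ys').reverse := by simp
      rcases hr : (y :: ys').reverse with _ | ⟨hd, tl⟩
      · exact absurd hr (by simp)
      · rw [hrev, hr]
        by_cases hq : pvIsPrecTok x = true
        · have hpop : pvPopLoop (x :: hd :: tl) = pvPopLoop (hd :: tl) := by
            simp [pvPopLoop, hq]
          rw [hpop, ← hr, ih hys]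
          rw [pvKeepIdx_append, if_neg (by simp [hq])]
          have hub := (pvKeepIdx_bounds (y :: ys')).2
          have hlb := (pvKeepIdx_bounds (y :: ys')).1
          rw [List.take_append_of_le_length]
          have : (0:Int) < (y :: ys').length := by simp
          omega
        · have hpop : pvPopLoop (x :: hd :: tl) = x :: hd :: tl := by
            simp [pvPopLoop, hq]
          rw [hpop, ← hr, ← hrev, List.reverse_reverse]
          rw [pvKeepIdx_append, if_pos ⟨by simp, by simpa using hq⟩]
          rw [List.take_of_length_le]
          simp

-- ===== VERDICT (by name: the statement is the Claim_ definition above) =====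
theorem extract_muni_from_precinct_label_py_spec : Claim_equal_extract_muni_from_precinct_label_py := by
  intro label _
  unfold Spec_extract_muni_from_precinct_label_py
  cases label with
  | none => rfl
  | some s =>
    simp only [extract_muni_from_precinct_label_py, extract_muni_from_precinct_label_py_alt]
    by_cases h0 : s = ""
    · simp [h0]
    · rw [if_neg h0, if_neg h0]
      split
      · rfl
      · have hne : pvSplitSp s.toList ≠ [] := pvSplitSp_ne_nil s.toList
        have hrne : (pvSplitSp s.toList).reverse ≠ [] := by simpa using hne
        have hkey := pvKey (pvSplitSp s.toList).reverse hrne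
          (by intro p hp; exact pvSplitSp_no_space s.toList p (List.mem_reverse.mp hp))
        rw [List.reverse_reverse] at hkey
        have hAB : pvALoop s.toList
            = PySem.Chars.join [' '] ((pvPopLoop (pvSplitSp s.toList).reverse).reverse) := by
          conv_lhs => rw [← pvJoin_pvSplitSp s.toList]
          exact hkey
        have hlb := (pvKeepIdx_bounds (pvSplitSp s.toList)).1
        have hslice : PySem.List.slice (pvSplitSp s.toList) none (some (pvKeepIdx (pvSplitSp s.toList)))
            = (pvSplitSp s.toList).take (pvKeepIdx (pvSplitSp s.toList)).toNat := by
          rw [show pvKeepIdx (pvSplitSp s.toList) = ((pvKeepIdx (pvSplitSp s.toList)).toNat : Int) from by omega]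
          exact PySem.List.slice_to_natCast ..
        rw [pvSplitOn_eq, hAB, pvPop_take _ hne, ← hslice]
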